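-- pv_equiv track=rewrite | github.com/duns-scotus/mlpy | tests/ml_integration/ml_core/03_graph_search_astar.py | array_shift
-- ===== SOURCE A (Python) =====
-- def get_length(arr):
--     len = 0
--     try:
--         i = 0
--         while True:
--             temp = arr[i]
--             i = (i + 1)
--             len = (len + 1)
--     except Exception as e:
--         pass
--     finally:
--         pass
--     return len
--
-- def array_shift(arr):
--     len = get_length(arr)
--     if (len == 0):
--         return arr
--     new_arr = []
--     i = 1
--     while (i < len):
--         new_arr = (new_arr + [arr[i]])
--         i = (i + 1)
--     return new_arr
-- ===== SOURCE B (Python) =====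
-- def array_shift(arr):
--     it = iter(arr)
--     try:
--         next(it)
--     except StopIteration:
--         return arr
--     res = []
--     for x in it:
--         res.append(x)
--     return res
-- ===== Notes on version B (the rewrite author's own statement) =====
-- stated objective: simpler
-- what changed: B discards the first element via an iterator and collects the rest in one pass, instead of A's separate exception-driven length count followed by an index loop that rebuilds the result with quadratic list concatenation.
import Mathlib
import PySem

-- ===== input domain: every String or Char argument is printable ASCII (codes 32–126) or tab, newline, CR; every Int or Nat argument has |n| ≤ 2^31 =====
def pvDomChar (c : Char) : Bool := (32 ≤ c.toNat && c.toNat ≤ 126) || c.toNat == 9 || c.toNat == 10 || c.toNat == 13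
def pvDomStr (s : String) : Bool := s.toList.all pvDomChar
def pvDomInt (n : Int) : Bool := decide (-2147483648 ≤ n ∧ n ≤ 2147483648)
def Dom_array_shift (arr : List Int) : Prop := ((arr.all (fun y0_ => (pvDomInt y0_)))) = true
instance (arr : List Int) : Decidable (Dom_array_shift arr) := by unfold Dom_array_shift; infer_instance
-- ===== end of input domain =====

-- B replaces A's exception-driven length count plus index loop by a single iterator pass (simpler, linear).

-- ===== PORT A =====
-- A's get_length: index upward until arr[i] raises IndexError, counting.
def pvGetLength (arr : List Int) (i len : Nat) : Nat :=
  match h : PySem.List.pyGet? arr (i : Int) with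
  | some _ => pvGetLength arr (i + 1) (len + 1)
  | none => len
termination_by arr.length - i
decreasing_by
  have : i < arr.length := by
    by_contra hge
    simp [PySem.List.pyGet?_natCast, List.getElem?_eq_none (by omega : arr.length ≤ i)] at h
  omega

-- A's main loop: new_arr = new_arr + [arr[i]] while i < len.
def pvShiftLoop (arr : List Int) (len i : Nat) (acc : List Int) : List Int :=
  if i < len then
    match PySem.List.pyGet? arr (i : Int) with
    | some v => pvShiftLoop arr len (i + 1) (acc ++ [v])
    | none => acc  -- unreachable: A is only called with len = actual length
  else acc
termination_by len - i

def array_shift (arr : List Int) : List Int :=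
  let len := pvGetLength arr 0 0
  if len = 0 then arr
  else pvShiftLoop arr len 1 []

-- ===== PORT B =====
-- the for-loop over the rest of the iterator, appending to res
def pvCollect (it : List Int) : List Int :=
  match it with
  | [] => []
  | x :: rest => x :: pvCollect rest

def array_shift_alt (arr : List Int) : List Int :=
  match arr with
  | [] => arr          -- next(it) raised StopIteration
  | _ :: it => pvCollect it

-- ===== PRECONDITION & SPEC =====
def Spec_array_shift (arr : List Int) (out : List Int) : Prop := out = array_shift_alt arr
instance (arr : List Int) (out : List Int) : Decidable (Spec_array_shift arr out) := by unfold Spec_array_shift; infer_instance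

-- ===== CLAIM (what is proved, stated in full; the proofs are below) =====
def Claim_equal_array_shift : Prop := ∀ (arr : List Int), Dom_array_shift arr → Spec_array_shift arr (array_shift arr)

-- ===== LEMMAS AND PROOFS =====
theorem pvGetLength_eq (arr : List Int) (i len : Nat) (h : i ≤ arr.length) :
    pvGetLength arr i len = len + (arr.length - i) := by
  induction hn : arr.length - i generalizing i len with
  | zero =>
    rw [pvGetLength]
    split
    · next v hv =>
      exfalso
      simp [PySem.List.pyGet?_natCast,
        List.getElem?_eq_none (by omega : arr.length ≤ i)] at hv
    · omega
  | succ n ih =>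
    have hi : i < arr.length := by omega
    rw [pvGetLength]
    split
    · next v hv =>
      rw [ih (i + 1) (len + 1) (by omega) (by omega)]
      omega
    · next hv =>
      exfalso
      simp [PySem.List.pyGet?_natCast, List.getElem?_eq_getElem hi] at hv

theorem pvShiftLoop_eq (arr : List Int) (i : Nat) (acc : List Int) (h : i ≤ arr.length) :
    pvShiftLoop arr arr.length i acc = acc ++ arr.drop i := by
  induction hn : arr.length - i generalizing i acc with
  | zero =>
    have : i = arr.length := by omega
    rw [pvShiftLoop]
    simp [this]
  | succ n ih =>
    have hi : i < arr.length := by omega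
    rw [pvShiftLoop, if_pos hi, PySem.List.pyGet?_natCast,
      List.getElem?_eq_getElem hi]
    show pvShiftLoop arr arr.length (i + 1) (acc ++ [arr[i]]) = acc ++ arr.drop i
    rw [ih (i + 1) _ (by omega) (by omega)]
    rw [List.append_assoc]
    congr 1
    rw [List.drop_eq_getElem_cons hi]; rfl

theorem pvCollect_eq (l : List Int) : pvCollect l = l := by
  induction l with
  | nil => rfl
  | cons x t ih => simp [pvCollect, ih]

-- ===== VERDICT (by name: the statement is the Claim_ definition above) =====
theorem array_shift_spec : Claim_equal_array_shift := by
  intro arr _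
  show array_shift arr = array_shift_alt arr
  unfold array_shift
  rw [pvGetLength_eq arr 0 0 (by omega)]
  match arr with
  | [] => rfl
  | x :: t =>
    simp only [List.length_cons, Nat.zero_add, Nat.sub_zero]
    rw [if_neg (by omega)]
    have := pvShiftLoop_eq (x :: t) 1 [] (by simp)
    simp only [List.length_cons] at this
    rw [this]
    simp [array_shift_alt, pvCollect_eq]
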